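-- pv_equiv track=rewrite | github.com/teyter/bioinfo | debruijn/teitlib.py | bagmin
-- ===== SOURCE A (Python) =====
-- def bagmin(tli):
--     ret = []
--     currentMin = 99
--     for i in range(len(tli)):
--         nr = tli[i][0]
--         item = tli[i][1]
--         allt = tli[i] # debug
--         if nr < currentMin:
--             currentMin = nr
--             ret.clear()
--             ret.append(item)
--         elif nr == currentMin:
--             ret.append(item)
--     return ret
-- ===== SOURCE B (Python) =====
-- def bagmin(tli):
--     m = min([99] + [t[0] for t in tli])
--     return [t[1] for t in tli if t[0] == m]
-- ===== Notes on version B (the rewrite author's own statement) =====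
-- stated objective: simpler
-- what changed: Replaces A's single running-min pass with clear-and-rebuild list mutation by a compute-the-min-then-filter pair of comprehensions (the 99 sentinel folded into the min).
import Mathlib
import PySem

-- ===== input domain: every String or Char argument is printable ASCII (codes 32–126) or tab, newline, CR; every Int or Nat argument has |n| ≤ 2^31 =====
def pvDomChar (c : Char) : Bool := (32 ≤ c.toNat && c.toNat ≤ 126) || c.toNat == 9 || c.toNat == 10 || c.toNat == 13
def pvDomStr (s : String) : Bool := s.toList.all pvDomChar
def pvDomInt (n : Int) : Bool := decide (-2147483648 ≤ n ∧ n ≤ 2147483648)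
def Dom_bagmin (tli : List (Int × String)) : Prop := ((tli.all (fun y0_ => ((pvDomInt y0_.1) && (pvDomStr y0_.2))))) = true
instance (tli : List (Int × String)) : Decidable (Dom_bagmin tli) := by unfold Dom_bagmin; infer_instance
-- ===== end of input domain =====

-- B replaces A's running-min pass with clear-and-rebuild by compute-min-then-filter (simpler decomposition; same cost).


-- ===== PORT A =====
-- the for-loop over tli with state (ret, currentMin)
def bagminLoop (l : List (Int × String)) (ret : List String) (currentMin : Int) : List String :=
  match l with
  | [] => ret
  | t :: rest =>
    let nr := t.1
    let item := t.2
    if nr < currentMin then bagminLoop rest [item] nr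
    else if nr = currentMin then bagminLoop rest (ret ++ [item]) currentMin
    else bagminLoop rest ret currentMin

def bagmin (tli : List (Int × String)) : List String :=
  bagminLoop tli [] 99

-- ===== PORT B =====
def bagmin_alt (tli : List (Int × String)) : List String :=
  let m := (PySem.List.min? ((99 : Int) :: tli.map Prod.fst) (fun x => x)).getD 99
  (tli.filter (fun t => t.1 = m)).map Prod.snd

-- ===== PRECONDITION & SPEC =====
def Spec_bagmin (tli : List (Int × String)) (out : List String) : Prop := out = bagmin_alt tli
instance (tli : List (Int × String)) (out : List String) : Decidable (Spec_bagmin tli out) := by unfold Spec_bagmin; infer_instance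

-- ===== CLAIM (what is proved, stated in full; the proofs are below) =====
def Claim_equal_bagmin : Prop := ∀ (tli : List (Int × String)), Dom_bagmin tli → Spec_bagmin tli (bagmin tli)

-- ===== LEMMAS AND PROOFS =====

theorem foldl_min_le_init (l : List Int) : ∀ c : Int, l.foldl min c ≤ c := by
  induction l with
  | nil => intro c; simp
  | cons a t ih => intro c; exact le_trans (ih (min c a)) (min_le_left _ _)

-- invariant of A's loop: its result is the still-kept prefix plus the items tied for the running minimum
theorem bagminLoop_eq (l : List (Int × String)) : ∀ (ret : List String) (cm : Int),
    bagminLoop l ret cm =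
      (if (l.map Prod.fst).foldl min cm < cm then [] else ret) ++
        (l.filter (fun t => t.1 = (l.map Prod.fst).foldl min cm)).map Prod.snd := by
  induction l with
  | nil => intro ret cm; simp [bagminLoop]
  | cons t rest ih =>
    intro ret cm
    obtain ⟨a, b⟩ := t
    by_cases h1 : a < cm
    · have hmin : min cm a = a := by omega
      have hle : (rest.map Prod.fst).foldl min a ≤ a := foldl_min_le_init _ _
      rw [show bagminLoop ((a, b) :: rest) ret cm = bagminLoop rest [b] a by
        simp [bagminLoop, h1]]
      rw [ih [b] a]
      simp only [List.map_cons, List.foldl_cons, hmin, List.filter_cons]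
      by_cases h2 : (rest.map Prod.fst).foldl min a < a
      · have : ¬ (a = (rest.map Prod.fst).foldl min a) := by omega
        simp [h2, this, show (rest.map Prod.fst).foldl min a < cm by omega]
      · have heq : (rest.map Prod.fst).foldl min a = a := by omega
        rw [heq, if_neg (lt_irrefl a), if_pos h1]
        simp
    · have hmin : min cm a = cm := by omega
      have hle : (rest.map Prod.fst).foldl min cm ≤ cm := foldl_min_le_init _ _
      by_cases h2 : a = cm
      · rw [show bagminLoop ((a, b) :: rest) ret cm = bagminLoop rest (ret ++ [b]) cm by
          simp [bagminLoop, h1, h2]]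
        rw [ih (ret ++ [b]) cm]
        simp only [List.map_cons, List.foldl_cons, h2, List.filter_cons]
        by_cases h3 : (rest.map Prod.fst).foldl min cm < cm
        · have : ¬ (cm = (rest.map Prod.fst).foldl min cm) := by omega
          simp [h3, this]
        · have heq : (rest.map Prod.fst).foldl min cm = cm := by omega
          simp [heq]
      · rw [show bagminLoop ((a, b) :: rest) ret cm = bagminLoop rest ret cm by
          simp [bagminLoop, h1, h2]]
        rw [ih ret cm]
        simp only [List.map_cons, List.foldl_cons, hmin, List.filter_cons]
        have : ¬ (a = (rest.map Prod.fst).foldl min cm) := by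
          intro h; omega
        simp [this]

-- ===== VERDICT (by name: the statement is the Claim_ definition above) =====
theorem bagmin_spec : Claim_equal_bagmin := by
  intro tli _
  unfold Spec_bagmin bagmin bagmin_alt
  rw [bagminLoop_eq]
  have hle : (tli.map Prod.fst).foldl min 99 ≤ 99 := foldl_min_le_init _ _
  rw [PySem.List.min?_id_cons]
  simp
  rfl
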